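-- pv_equiv track=rewrite | github.com/norikinishida/treetk | treetk/treetk.py | _insert_dummy_nonterminal_labels
-- ===== SOURCE A (Python) =====
-- def preprocess(x, LPAREN="(", RPAREN=")"):
--     """
--     :type x: str or list of str
--     :rtype: list of str
--     """
--     if isinstance(x, list):
--         x = " ".join(x)
--     sexp = x.replace(LPAREN, " %s " % LPAREN).replace(RPAREN, " %s " % RPAREN).split()
--     return sexp
--
-- def _insert_dummy_nonterminal_labels(text, with_terminal_labels, LPAREN="("):
--     """
--     :type text: str
--     :type with_terminal_labels: bool
--     :rtype: str
--     """
--     if not with_terminal_labels: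
--         text = text.replace(LPAREN, "%s * " % LPAREN)
--     else:
--         sexp = preprocess(text)
--         for i in range(len(sexp)-1):
--             if (sexp[i] == LPAREN) and (sexp[i+1] == LPAREN):
--                 sexp[i] = "%s * " % LPAREN
--         text = " ".join(sexp)
--     return text
-- ===== SOURCE B (Python) =====
-- def preprocess(x, LPAREN="(", RPAREN=")"):
--     if isinstance(x, list):
--         x = " ".join(x)
--     return x.replace(LPAREN, " %s " % LPAREN).replace(RPAREN, " %s " % RPAREN).split()
--
-- def _insert_dummy_nonterminal_labels(text, with_terminal_labels, LPAREN="("):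
--     if not with_terminal_labels:
--         return text.replace(LPAREN, "%s * " % LPAREN)
--     # single right-to-left pass: carry whether the token just to the right is
--     # LPAREN, prepend each (possibly rewritten) token to the output list.
--     out = []
--     follows_lparen = False
--     for tok in reversed(preprocess(text)):
--         out = [LPAREN + " * " if follows_lparen and tok == LPAREN else tok] + out
--         follows_lparen = (tok == LPAREN)
--     return " ".join(out)
-- ===== Notes on version B (the rewrite author's own statement) =====
-- stated objective: alternative
-- what changed: The index loop over range(len(sexp)-1) that mutates the token list in place is replaced by a single right-to-left pass over the tokens that carries a one-token lookahead flag (is the token to the right LPAREN?) and prepends each possibly rewritten token to the output, with no index arithmetic and no in-place mutation.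
import Mathlib
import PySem

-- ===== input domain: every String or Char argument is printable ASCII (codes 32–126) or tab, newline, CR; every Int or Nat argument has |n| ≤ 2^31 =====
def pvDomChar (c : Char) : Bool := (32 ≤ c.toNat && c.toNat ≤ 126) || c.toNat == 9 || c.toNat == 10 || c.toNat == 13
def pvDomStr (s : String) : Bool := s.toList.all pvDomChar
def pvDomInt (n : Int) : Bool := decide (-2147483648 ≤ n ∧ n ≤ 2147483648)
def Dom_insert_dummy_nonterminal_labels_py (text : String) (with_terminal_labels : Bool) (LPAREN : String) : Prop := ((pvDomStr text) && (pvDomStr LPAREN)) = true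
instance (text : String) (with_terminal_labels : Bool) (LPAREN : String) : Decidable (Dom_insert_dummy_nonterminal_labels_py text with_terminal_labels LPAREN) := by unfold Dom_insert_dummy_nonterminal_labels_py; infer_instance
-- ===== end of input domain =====

-- B replaces A's index loop over a mutable token list by a single right-to-left
-- pass carrying a one-token lookahead flag (objective: alternative; same cost).

-- ===== PORT A =====
-- helper shared by both Pythons verbatim: preprocess(text) with its default parens
def pvPreprocess (x : String) : List String :=
  PySem.Str.split₀ (PySem.Str.replace (PySem.Str.replace x "(" " ( ") ")" " ) ")

def insert_dummy_nonterminal_labels_py (text : String) (with_terminal_labels : Bool) (LPAREN : String) : String :=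
  if !with_terminal_labels then
    PySem.Str.replace text LPAREN (LPAREN ++ " * ")
  else
    let sexp0 := pvPreprocess text
    -- for i in range(len(sexp)-1): if sexp[i]==LPAREN and sexp[i+1]==LPAREN: sexp[i] = LPAREN + " * "
    let sexp := (PySem.List.pyRange 0 ((sexp0.length : Int) - 1) 1).foldl
      (fun s i =>
        if PySem.List.pyGetD s i "" == LPAREN && PySem.List.pyGetD s (i + 1) "" == LPAREN then
          PySem.List.pySetD s i (LPAREN ++ " * ")
        else s) sexp0
    PySem.Str.join " " sexp

-- ===== PORT B =====
def insert_dummy_nonterminal_labels_py_alt (text : String) (with_terminal_labels : Bool) (LPAREN : String) : String :=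
  if !with_terminal_labels then
    PySem.Str.replace text LPAREN (LPAREN ++ " * ")
  else
    let st := (pvPreprocess text).reverse.foldl
      (fun (st : List String × Bool) tok =>
        ((if st.2 && (tok == LPAREN) then LPAREN ++ " * " else tok) :: st.1, tok == LPAREN))
      ([], false)
    PySem.Str.join " " st.1

-- ===== PRECONDITION & SPEC =====
def Spec_insert_dummy_nonterminal_labels_py (text : String) (with_terminal_labels : Bool) (LPAREN : String) (out : String) : Prop := out = insert_dummy_nonterminal_labels_py_alt text with_terminal_labels LPAREN
instance (text : String) (with_terminal_labels : Bool) (LPAREN : String) (out : String) : Decidable (Spec_insert_dummy_nonterminal_labels_py text with_terminal_labels LPAREN out) := by unfold Spec_insert_dummy_nonterminal_labels_py; infer_instance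

-- ===== CLAIM (what is proved, stated in full; the proofs are below) =====
def Claim_equal_insert_dummy_nonterminal_labels_py : Prop := ∀ (text : String) (with_terminal_labels : Bool) (LPAREN : String), Dom_insert_dummy_nonterminal_labels_py text with_terminal_labels LPAREN → Spec_insert_dummy_nonterminal_labels_py text with_terminal_labels LPAREN (insert_dummy_nonterminal_labels_py text with_terminal_labels LPAREN)

-- ===== LEMMAS AND PROOFS =====

-- whether the token list starts with LPAREN (the "next token" test)
def pvNextL (L : String) : List String → Bool
  | [] => false
  | y :: _ => y == L

-- the common specification of both loops: rewrite each token that equals L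
-- and whose successor equals L
def pvPmap (L : String) : List String → List String
  | [] => []
  | x :: r => (if pvNextL L r && x == L then L ++ " * " else x) :: pvPmap L r

theorem pvPmap_length (L : String) (t : List String) : (pvPmap L t).length = t.length := by
  induction t with
  | nil => rfl
  | cons x r ih => simp [pvPmap, ih]

theorem pvPmap_getElem (L : String) (t : List String) (m : Nat) (h : m < t.length) :
    (pvPmap L t)[m]'(by rw [pvPmap_length]; exact h) =
      if pvNextL L (t.drop (m + 1)) && t[m] == L then L ++ " * " else t[m] := by
  induction t generalizing m with
  | nil => simp at h
  | cons x r ih =>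
    cases m with
    | zero => simp [pvPmap]
    | succ k =>
      simp only [pvPmap, List.getElem_cons_succ, List.drop_succ_cons]
      exact ih k (by simpa using h)

-- B's right-to-left fold computes pvPmap (plus the head flag)
theorem pvFoldB (L : String) (t : List String) :
    t.reverse.foldl
      (fun (st : List String × Bool) tok =>
        ((if st.2 && (tok == L) then L ++ " * " else tok) :: st.1, tok == L))
      ([], false) = (pvPmap L t, pvNextL L t) := by
  rw [List.foldl_reverse]
  induction t with
  | nil => rfl
  | cons x r ih =>
    rw [List.foldr_cons, ih]
    simp [pvPmap, pvNextL]

-- A's index loop, processed up to index m, equals the rewritten prefix ++ untouched suffix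
theorem pvFoldA_inv (L : String) (t : List String) (m : Nat) (hm : m + 1 ≤ t.length) :
    ((List.range m).map (fun k : Nat => (k : Int))).foldl
      (fun s i =>
        if PySem.List.pyGetD s i "" == L && PySem.List.pyGetD s (i + 1) "" == L then
          PySem.List.pySetD s i (L ++ " * ")
        else s) t = (pvPmap L t).take m ++ t.drop m := by
  induction m with
  | zero => simp
  | succ k ih =>
    have hk : k + 1 ≤ t.length := by omega
    have hkl : k < t.length := by omega
    have hk1 : k + 1 < t.length := by omega
    rw [List.range_succ, List.map_append, List.foldl_append, ih hk]
    have hlen : ((pvPmap L t).take k).length = k := by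
      rw [List.length_take, pvPmap_length]; omega
    have hgetk : PySem.List.pyGetD ((pvPmap L t).take k ++ t.drop k) ((k : Nat) : Int) "" = t[k] := by
      rw [PySem.List.pyGetD_natCast]
      rw [List.getD_eq_getElem?_getD, List.getElem?_append_right (by omega), hlen]
      simp [hkl]
    have hgetk1 : PySem.List.pyGetD ((pvPmap L t).take k ++ t.drop k) (((k : Nat) : Int) + 1) "" = t[k + 1] := by
      have : ((k : Nat) : Int) + 1 = ((k + 1 : Nat) : Int) := by push_cast; ring
      rw [this, PySem.List.pyGetD_natCast]
      rw [List.getD_eq_getElem?_getD, List.getElem?_append_right (by omega), hlen]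
      have : k + 1 - k = 1 := by omega
      rw [this]
      rw [List.drop_eq_getElem_cons hkl]
      simp [List.getElem?_drop, hk1]
    have hdropk : t.drop k = t[k] :: t.drop (k + 1) := List.drop_eq_getElem_cons hkl
    have htake : (pvPmap L t).take (k + 1) = (pvPmap L t).take k ++ [(pvPmap L t)[k]'(by rw [pvPmap_length]; exact hkl)] := by
      rw [List.take_add_one, List.getElem?_eq_getElem (by rw [pvPmap_length]; exact hkl)]
      rfl
    have hnext : pvNextL L (t.drop (k + 1)) = (t[k + 1] == L) := by
      rw [List.drop_eq_getElem_cons hk1]; rfl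
    simp only [List.map_cons, List.map_nil, List.foldl_cons, List.foldl_nil, hgetk, hgetk1]
    by_cases hc : (t[k] == L) = true ∧ (t[k + 1] == L) = true
    · rw [if_pos (by simp [hc.1, hc.2])]
      rw [PySem.List.pySetD_natCast]
      rw [htake, pvPmap_getElem L t k hkl, hnext]
      rw [if_pos (by simp [hc.1, hc.2])]
      rw [hdropk]
      rw [List.set_append_right _ _ (by omega), hlen]
      simp only [Nat.sub_self, List.set_cons_zero]
      simp
    · rw [if_neg (by intro h; simp only [Bool.and_eq_true] at h; exact hc h)]
      rw [htake, pvPmap_getElem L t k hkl, hnext]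
      rw [if_neg (by intro h; simp only [Bool.and_eq_true] at h; exact hc ⟨h.2, h.1⟩)]
      rw [hdropk]
      simp

-- A's whole loop computes pvPmap
theorem pvFoldA (L : String) (t : List String) :
    (PySem.List.pyRange 0 ((t.length : Int) - 1) 1).foldl
      (fun s i =>
        if PySem.List.pyGetD s i "" == L && PySem.List.pyGetD s (i + 1) "" == L then
          PySem.List.pySetD s i (L ++ " * ")
        else s) t = pvPmap L t := by
  cases t with
  | nil => rw [PySem.List.pyRange_one_eq_nil (by simp)]; rfl
  | cons x r =>
    have hlen : (((x :: r).length : Int) - 1 - 0).toNat = r.length := by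
      simp
    rw [PySem.List.pyRange_one, hlen]
    have := pvFoldA_inv L (x :: r) r.length (by simp)
    simp only [zero_add]
    rw [this]
    have hlast : (pvPmap L (x :: r)).take r.length ++ (x :: r).drop r.length = pvPmap L (x :: r) := by
      have h1 : r.length < (x :: r).length := by simp
      have hg : (pvPmap L (x :: r))[r.length]'(by rw [pvPmap_length]; exact h1) = (x :: r)[r.length]'h1 := by
        rw [pvPmap_getElem L (x :: r) r.length h1]
        have : (x :: r).drop (r.length + 1) = [] := by
          apply List.drop_eq_nil_of_le; simp
        rw [this]
        simp [pvNextL]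
      have : (x :: r).drop r.length = [(x :: r)[r.length]'h1] := by
        rw [List.drop_eq_getElem_cons h1]
        congr 1
        apply List.drop_eq_nil_of_le; simp
      rw [this, ← hg]
      have h2 : r.length < (pvPmap L (x :: r)).length := by rw [pvPmap_length]; exact h1
      have h3 : [(pvPmap L (x :: r))[r.length]'h2] = ((pvPmap L (x :: r))[r.length]?).toList := by
        rw [List.getElem?_eq_getElem h2]
        rfl
      rw [h3, ← List.take_add_one]
      apply List.take_of_length_le
      rw [pvPmap_length]; simp
    exact hlast

-- ===== VERDICT (by name: the statement is the Claim_ definition above) =====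
theorem insert_dummy_nonterminal_labels_py_spec : Claim_equal_insert_dummy_nonterminal_labels_py := by
  intro text wtl LPAREN _
  unfold Spec_insert_dummy_nonterminal_labels_py
  cases wtl with
  | false =>
    show PySem.Str.replace text LPAREN (LPAREN ++ " * ")
        = PySem.Str.replace text LPAREN (LPAREN ++ " * ")
    rfl
  | true =>
    have hA : insert_dummy_nonterminal_labels_py text true LPAREN =
        PySem.Str.join " " (pvPmap LPAREN (pvPreprocess text)) := by
      show PySem.Str.join " " ((PySem.List.pyRange 0 (((pvPreprocess text).length : Int) - 1) 1).foldl
        (fun s i =>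
          if PySem.List.pyGetD s i "" == LPAREN && PySem.List.pyGetD s (i + 1) "" == LPAREN then
            PySem.List.pySetD s i (LPAREN ++ " * ")
          else s) (pvPreprocess text)) = _
      rw [pvFoldA]
    have hB : insert_dummy_nonterminal_labels_py_alt text true LPAREN =
        PySem.Str.join " " (pvPmap LPAREN (pvPreprocess text)) := by
      show PySem.Str.join " " (((pvPreprocess text).reverse.foldl
        (fun (st : List String × Bool) tok =>
          ((if st.2 && (tok == LPAREN) then LPAREN ++ " * " else tok) :: st.1, tok == LPAREN))
        ([], false)).1) = _
      rw [pvFoldB]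
    rw [hA, hB]
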